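-- pv_equiv track=rewrite | github.com/Henrichyusef/CodeWars | Python/7kyu/thePoetAndThePendulum.py | pendulum
-- ===== SOURCE A (Python) =====
-- def pendulum(values):
--     """Sort numbers into a pendulum order"""
--     values.sort()
--     # 1 = right 0 = left
--     rightOrLeft = 1
--     minValue = min(values)
--
--     leftList = []
--     rightList = [minValue]
--
--     for number in values[1:]:
--         if rightOrLeft == 1:
--             rightList.append(number)
--             rightOrLeft = 0
--         else:
--             leftList.append(number)
--             rightOrLeft = 1
--     return leftList[::-1] + rightList
-- ===== SOURCE B (Python) =====
-- def pendulum(values):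
--     """Sort numbers into a pendulum order"""
--     values.sort()
--     m = min(values)
--     n = len(values)
--     L = (n - 1) // 2
--     return [values[2 * (L - j)] for j in range(L)] + [m] + [values[2 * k - 1] for k in range(1, n - L)]
-- ===== Notes on version B (the rewrite author's own statement) =====
-- stated objective: alternative
-- what changed: Replaces A's stateful left/right toggle loop over the sorted tail with a direct closed-form index mapping: the result is assembled from two comprehensions that read the sorted list at computed even/odd positions, with no alternation state.
import Mathlib
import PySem

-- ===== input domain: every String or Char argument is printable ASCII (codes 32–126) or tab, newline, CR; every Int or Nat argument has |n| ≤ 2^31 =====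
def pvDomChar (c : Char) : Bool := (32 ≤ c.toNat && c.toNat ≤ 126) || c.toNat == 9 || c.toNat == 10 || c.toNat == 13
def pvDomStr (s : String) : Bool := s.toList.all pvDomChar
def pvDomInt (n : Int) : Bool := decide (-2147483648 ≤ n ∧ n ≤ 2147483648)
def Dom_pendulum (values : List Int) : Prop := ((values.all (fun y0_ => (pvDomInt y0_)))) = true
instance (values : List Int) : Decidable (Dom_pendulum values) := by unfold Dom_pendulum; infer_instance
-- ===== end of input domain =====

-- B replaces A's toggle loop with a closed-form index mapping over the sorted list (alternative
-- decomposition, same cost). Both A and B sort `values` in place; the theorems are about the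
-- return value (the mutation is identical in A and B).

-- ===== PORT A =====
-- the 'for number in values[1:]' loop with state (rightOrLeft, leftList, rightList)
def pendulumLoop : List Int → Int → List Int → List Int → List Int × List Int
  | [], _, l, r => (l, r)
  | x :: xs, rl, l, r =>
    if rl = 1 then pendulumLoop xs 0 l (r ++ [x])
    else pendulumLoop xs 1 (l ++ [x]) r

def pendulum (values : List Int) : List Int :=
  let sv := PySem.List.sorted values id
  match PySem.List.min? sv id with
  | none => []  -- min([]) raises ValueError in Python; excluded by Pre_pendulum
  | some m =>
    let lr := pendulumLoop (PySem.List.slice sv (some 1) none) 1 [] [m]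
    lr.1.reverse ++ lr.2   -- leftList[::-1] + rightList

-- ===== PORT B =====
def pendulum_alt (values : List Int) : List Int :=
  let sv := PySem.List.sorted values id
  match PySem.List.min? sv id with
  | none => []  -- min([]) raises ValueError in Python; excluded by Pre_pendulum
  | some m =>
    let n : Int := sv.length
    let L : Int := PySem.Int.floordiv (n - 1) 2
    -- the comprehension indices 2*(L-j) and 2*k-1 are always in range, so the default of
    -- pyGetD is never used (Python's values[i] raises only out of range)
    ((PySem.List.pyRange 0 L 1).map (fun j => PySem.List.pyGetD sv (2 * (L - j)) 0))
      ++ [m]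
      ++ ((PySem.List.pyRange 1 (n - L) 1).map (fun k => PySem.List.pyGetD sv (2 * k - 1) 0))

-- ===== PRECONDITION & SPEC =====
-- Pre_ excludes only the empty list, on which both A and B raise ValueError (min of empty sequence).
def Pre_pendulum (values : List Int) : Prop := values ≠ []
instance (values : List Int) : Decidable (Pre_pendulum values) := by unfold Pre_pendulum; infer_instance
def pvWitness_pendulum : List Int := ([3, 1, 2, 5, 4])
def Spec_pendulum (values : List Int) (out : List Int) : Prop := out = pendulum_alt values
instance (values : List Int) (out : List Int) : Decidable (Spec_pendulum values out) := by unfold Spec_pendulum; infer_instance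

-- ===== CLAIM (what is proved, stated in full; the proofs are below) =====
def Claim_equal_pendulum : Prop := ∀ (values : List Int), Dom_pendulum values → Pre_pendulum values → Spec_pendulum values (pendulum values)

-- ===== LEMMAS AND PROOFS =====

-- elements of a list at even / odd positions (what A's toggle loop distributes)
def evens : List Int → List Int
  | [] => []
  | [x] => [x]
  | x :: _ :: xs => x :: evens xs

def odds : List Int → List Int
  | [] => []
  | [_] => []
  | _ :: y :: xs => y :: odds xs

theorem loopSpec (t : List Int) : ∀ l r : List Int,
    pendulumLoop t 1 l r = (l ++ odds t, r ++ evens t) := by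
  induction t using evens.induct with
  | case1 => intro l r; simp [pendulumLoop, odds, evens]
  | case2 x => intro l r; simp [pendulumLoop, odds, evens]
  | case3 x y xs ih =>
    intro l r
    simp only [pendulumLoop]
    norm_num
    rw [ih]
    simp [odds, evens]

theorem evens_eq (t : List Int) :
    evens t = (List.range ((t.length + 1) / 2)).map (fun i => t.getD (2 * i) 0) := by
  induction t using evens.induct with
  | case1 => simp [evens]
  | case2 x => simp [evens]
  | case3 x y xs ih =>
    have hlen : (((x :: y :: xs).length + 1) / 2) = ((xs.length + 1) / 2) + 1 := by
      simp; omega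
    rw [hlen, List.range_succ_eq_map]
    simp only [List.map_cons, evens]
    rw [ih, List.map_map]
    refine congrArg₂ (· :: ·) rfl (List.map_congr_left ?_)
    intro i _
    simp only [Function.comp]
    rw [show 2 * Nat.succ i = (2 * i + 1) + 1 from by omega]
    simp

theorem odds_eq (t : List Int) :
    odds t = (List.range (t.length / 2)).map (fun i => t.getD (2 * i + 1) 0) := by
  induction t using odds.induct with
  | case1 => simp [odds]
  | case2 x => simp [odds]
  | case3 x y xs ih =>
    have hlen : ((x :: y :: xs).length / 2) = (xs.length / 2) + 1 := by
      simp; omega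
    rw [hlen, List.range_succ_eq_map]
    simp only [List.map_cons, odds]
    rw [ih, List.map_map]
    refine congrArg₂ (· :: ·) rfl (List.map_congr_left ?_)
    intro i _
    simp only [Function.comp]
    rw [show 2 * Nat.succ i + 1 = (2 * i + 1 + 1) + 1 from by omega]
    simp

theorem reverse_map_range {α : Type} (n : Nat) (f : Nat → α) :
    ((List.range n).map f).reverse = (List.range n).map (fun j => f (n - 1 - j)) := by
  apply List.ext_getElem
  · simp
  · intro i h1 h2
    simp only [List.length_map, List.length_range] at h1 h2
    rw [List.getElem_reverse]
    simp only [List.getElem_map, List.getElem_range, List.length_map, List.length_range]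

theorem min?_cons_isSome : ∀ (t : List Int) (a : Int),
    ∃ m, PySem.List.min? (a :: t) id = some m := by
  intro t
  induction t with
  | nil => intro a; exact ⟨a, rfl⟩
  | cons y ys ih =>
    intro a
    have h1 : PySem.List.min? (a :: y :: ys) id
        = PySem.List.min? ((if id y < id a then y else a) :: ys) id := by
      simp only [PySem.List.min?, List.foldl_cons]
      congr 1
      split <;> rfl
    rw [h1]
    exact ih _

-- the core fact: on any nonempty list a :: t the two bodies agree
theorem body_eq (a : Int) (t : List Int) (m : Int) :
    (pendulumLoop (PySem.List.slice (a :: t) (some 1) none) 1 [] [m]).1.reverse ++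
      (pendulumLoop (PySem.List.slice (a :: t) (some 1) none) 1 [] [m]).2 =
    ((PySem.List.pyRange 0 (PySem.Int.floordiv (((a :: t).length : Int) - 1) 2) 1).map
        (fun j => PySem.List.pyGetD (a :: t) (2 * (PySem.Int.floordiv (((a :: t).length : Int) - 1) 2 - j)) 0))
      ++ [m]
      ++ ((PySem.List.pyRange 1 (((a :: t).length : Int) - PySem.Int.floordiv (((a :: t).length : Int) - 1) 2) 1).map
        (fun k => PySem.List.pyGetD (a :: t) (2 * k - 1) 0)) := by
  have hL : PySem.Int.floordiv (((a :: t).length : Int) - 1) 2 = ((t.length / 2 : Nat) : Int) := by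
    have h0 : (((a :: t).length : Int) - 1) = ((t.length : Nat) : Int) := by
      push_cast [List.length_cons]; ring
    rw [h0]; exact_mod_cast PySem.Int.floordiv_natCast t.length 2
  rw [PySem.List.slice_from_one, loopSpec, hL]
  show (odds t).reverse ++ ([m] ++ evens t) = _
  rw [odds_eq, evens_eq, reverse_map_range]
  rw [PySem.List.pyRange_one, PySem.List.pyRange_one]
  rw [show ((((t.length / 2 : Nat) : Int)) - 0).toNat = t.length / 2 from by omega]
  rw [show ((((a :: t).length : Int) - ((t.length / 2 : Nat) : Int)) - 1).toNat
        = t.length - t.length / 2 from by simp only [List.length_cons]; omega]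
  rw [List.map_map, List.map_map]
  rw [show (t.length + 1) / 2 = t.length - t.length / 2 from by omega]
  rw [← List.append_assoc]
  congr 1
  · congr 1
    apply List.map_congr_left
    intro j hj
    rw [List.mem_range] at hj
    simp only [Function.comp]
    rw [PySem.List.pyGetD_of_nonneg _ _ (by omega)]
    rw [show (2 * (((t.length / 2 : Nat) : Int) - (0 + (j : Int)))).toNat
          = (2 * (t.length / 2 - 1 - j) + 1) + 1 from by omega]
    rw [List.getD_cons_succ]
  · apply List.map_congr_left
    intro k hk
    rw [List.mem_range] at hk
    simp only [Function.comp]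
    rw [PySem.List.pyGetD_of_nonneg _ _ (by omega)]
    rw [show (2 * (1 + (k : Int)) - 1).toNat = (2 * k) + 1 from by omega]
    rw [List.getD_cons_succ]

-- ===== VERDICT (by name: the statement is the Claim_ definition above) =====
theorem pendulum_spec : Claim_equal_pendulum := by
  intro values _ hpre
  unfold Spec_pendulum pendulum pendulum_alt
  simp only []
  cases hsv : PySem.List.sorted values id with
  | nil =>
    exfalso
    apply hpre
    have := congrArg List.length hsv
    rw [PySem.List.length_sorted] at this
    exact List.eq_nil_of_length_eq_zero this
  | cons a t =>
    obtain ⟨m, hm⟩ := min?_cons_isSome t a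
    rw [hm]
    exact body_eq a t m
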